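-- pv_equiv track=rewrite | github.com/Amoursol/dynamoPython | revitAPI/xmlSvgExporter.py | ListChopUnevenly
-- ===== SOURCE A (Python) =====
-- def ListChopUnevenly(chopList, chopLengths) :
--
-- 	# create an empty list to return values from
-- 	chopped = []
-- 	# set an initail value for a counter
-- 	count = 0
-- 	# find the length of the list to be chopped
-- 	max = len(chopList)
--
-- 	# for each item in chopLengths
-- 	for num in chopLengths :
--
-- 		# check if counter has reached the length of the chopList
-- 		if count + num > max :
--
-- 			# set the end value as length of the chopList
-- 			end = max
--
-- 		# if counter has not reached the length of the chopList
-- 		else :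
--
-- 			# set the end value as the count + num
-- 			# eg count plus current value in chopLengths loop
-- 			end = count + num
--
-- 		# after checking above if and else conditions then
-- 		# slice the chopList between count and end
-- 		sliced = chopList[count:end]
-- 		# append the sliced list to chopped
-- 		chopped.append(sliced)
-- 		# set the count value to end value for next loop
-- 		count = end
--
-- 	# when all loops complete return sliced list of chopped values
-- 	return chopped
-- ===== SOURCE B (Python) =====
-- def ListChopUnevenly(chopList, chopLengths):
--     # Pass 1: build the table of clamped end boundaries.
--     n = len(chopList)
--     ends = []
--     count = 0
--     for num in chopLengths:
--         count = min(count + num, n)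
--         ends.append(count)
--     # Pass 2: starts are the previous ends (first start is 0); slice once per pair.
--     starts = [0] + ends[:-1]
--     return [chopList[s:e] for s, e in zip(starts, ends)]
-- ===== Notes on version B (the rewrite author's own statement) =====
-- stated objective: alternative
-- what changed: B first builds the table of clamped end boundaries in one pass, then derives start indices as [0]+ends[:-1] and produces all slices in a separate zip/comprehension pass, instead of interleaving clamping, slicing and appending in one loop.
import Mathlib
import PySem

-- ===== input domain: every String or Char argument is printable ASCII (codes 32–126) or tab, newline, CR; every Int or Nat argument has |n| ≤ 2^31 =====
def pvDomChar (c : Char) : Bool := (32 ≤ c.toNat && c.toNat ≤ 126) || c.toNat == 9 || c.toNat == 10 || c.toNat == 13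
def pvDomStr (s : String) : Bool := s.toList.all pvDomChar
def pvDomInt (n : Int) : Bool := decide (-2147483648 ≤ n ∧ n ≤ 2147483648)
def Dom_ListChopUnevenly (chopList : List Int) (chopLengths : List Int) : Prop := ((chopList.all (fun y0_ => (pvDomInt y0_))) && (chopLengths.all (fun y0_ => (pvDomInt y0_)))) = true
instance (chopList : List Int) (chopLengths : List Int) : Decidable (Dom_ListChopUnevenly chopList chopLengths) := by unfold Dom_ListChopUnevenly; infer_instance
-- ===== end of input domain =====

-- B builds the clamped end-boundary table first, then slices in a separate pass (alternative decomposition, same cost).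


-- ===== PORT A =====
-- literal transliteration of A: one loop carrying (chopped, count), branching on count+num > max
def ListChopUnevenly (chopList : List Int) (chopLengths : List Int) : List (List Int) :=
  let max := (chopList.length : Int)
  (chopLengths.foldl (fun (st : List (List Int) × Int) num =>
      let end_ := if st.2 + num > max then max else st.2 + num
      let sliced := PySem.List.slice chopList (some st.2) (some end_)
      (st.1 ++ [sliced], end_))
    ([], 0)).1

-- ===== PORT B =====
-- literal transliteration of B: build clamped end table, then starts = [0] + ends[:-1], then slice per zipped pair
def ListChopUnevenly_alt (chopList : List Int) (chopLengths : List Int) : List (List Int) :=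
  let n := (chopList.length : Int)
  let ends := (chopLengths.foldl (fun (st : List Int × Int) num =>
      let count := min (st.2 + num) n
      (st.1 ++ [count], count)) ([], 0)).1
  let starts := [(0 : Int)] ++ ends.dropLast
  (starts.zip ends).map (fun p => PySem.List.slice chopList (some p.1) (some p.2))

-- ===== PRECONDITION & SPEC =====
def Spec_ListChopUnevenly (chopList : List Int) (chopLengths : List Int) (out : List (List Int)) : Prop := out = ListChopUnevenly_alt chopList chopLengths
instance (chopList : List Int) (chopLengths : List Int) (out : List (List Int)) : Decidable (Spec_ListChopUnevenly chopList chopLengths out) := by unfold Spec_ListChopUnevenly; infer_instance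

-- ===== CLAIM (what is proved, stated in full; the proofs are below) =====
def Claim_equal_ListChopUnevenly : Prop := ∀ (chopList : List Int) (chopLengths : List Int), Dom_ListChopUnevenly chopList chopLengths → Spec_ListChopUnevenly chopList chopLengths (ListChopUnevenly chopList chopLengths)

-- ===== LEMMAS AND PROOFS =====

-- the common boundary sequence, as a structural recursion
def pvEnds (max : Int) : List Int → Int → List Int
  | [], _ => []
  | num :: ls, c => min (c + num) max :: pvEnds max ls (min (c + num) max)

-- the chopped list produced from a start counter c, as a structural recursion
def pvChop (l : List Int) (max : Int) : List Int → Int → List (List Int)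
  | [], _ => []
  | num :: ls, c =>
      PySem.List.slice l (some c) (some (min (c + num) max)) :: pvChop l max ls (min (c + num) max)

theorem pvFoldA (l : List Int) (max : Int) :
    ∀ (ls : List Int) (acc : List (List Int)) (c : Int),
    (ls.foldl (fun (st : List (List Int) × Int) num =>
        let end_ := if st.2 + num > max then max else st.2 + num
        let sliced := PySem.List.slice l (some st.2) (some end_)
        (st.1 ++ [sliced], end_)) (acc, c)).1 = acc ++ pvChop l max ls c := by
  intro ls
  induction ls with
  | nil => intro acc c; simp [pvChop]
  | cons num ls ih =>
      intro acc c
      have he : (if c + num > max then max else c + num) = min (c + num) max := by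
        split <;> omega
      simp only [List.foldl_cons, he, ih, pvChop]
      simp

theorem pvFoldE (n : Int) :
    ∀ (ls : List Int) (acc : List Int) (c : Int),
    (ls.foldl (fun (st : List Int × Int) num =>
        let count := min (st.2 + num) n
        (st.1 ++ [count], count)) (acc, c)).1 = acc ++ pvEnds n ls c := by
  intro ls
  induction ls with
  | nil => intro acc c; simp [pvEnds]
  | cons num ls ih =>
      intro acc c
      simp only [List.foldl_cons, ih, pvEnds]
      simp

theorem pvZipDropLast {α : Type} (e : α) (R : List α) :
    (e :: R).dropLast.zip R = (e :: R.dropLast).zip R := by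
  cases R <;> simp

theorem pvZipChop (l : List Int) (max : Int) :
    ∀ (ls : List Int) (c : Int),
    (((c :: (pvEnds max ls c).dropLast).zip (pvEnds max ls c)).map
        (fun p => PySem.List.slice l (some p.1) (some p.2))) = pvChop l max ls c := by
  intro ls
  induction ls with
  | nil => intro c; simp [pvEnds, pvChop]
  | cons num ls ih =>
      intro c
      simp only [pvEnds, pvChop]
      rw [List.zip_cons_cons, pvZipDropLast, List.map_cons, ih]

-- ===== VERDICT (by name: the statement is the Claim_ definition above) =====
theorem ListChopUnevenly_spec : Claim_equal_ListChopUnevenly := by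
  intro chopList chopLengths _
  unfold Spec_ListChopUnevenly ListChopUnevenly ListChopUnevenly_alt
  simp only [pvFoldA, pvFoldE, List.nil_append, List.singleton_append]
  rw [pvZipChop]
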